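-- pv_equiv track=rewrite | github.com/Language-Technology-Lab/Access-Control-Policy | src/entity_pair_generator.py | parse_predicted_entities
-- ===== SOURCE A (Python) =====
-- from typing import Dict, List, Tuple, Set, Optional
--
-- def parse_predicted_entities(entities_data: Dict) -> Tuple[List[str], List[str], List[str]]:
--     """
--     Parse entities from predicted entity extraction results JSON format.
--
--     Predicted entities format:
--     {
--         "nodes": [
--             {"label": "entity_name", "type": "user_attributes|object_attributes|policy_classes"},
--             ...
--         ]
--     }
--
--     Args:
--         entities_data: Dictionary from predicted entities JSON file
--
--     Returns:
--         Tuple of (user_attributes, object_attributes, policy_classes) as lists of strings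
--     """
--     user_attributes = []
--     object_attributes = []
--     policy_classes = []
--
--     for node in entities_data.get("nodes", []):
--         entity_type = node.get("type", "")
--         entity_name = node.get("label", "")
--
--         if not entity_name:  # Skip invalid nodes
--             continue
--
--         if entity_type == "user_attributes":
--             user_attributes.append(entity_name)
--         elif entity_type == "object_attributes":
--             object_attributes.append(entity_name)
--         elif entity_type == "policy_classes":
--             policy_classes.append(entity_name)
--
--     return user_attributes, object_attributes, policy_classes
-- ===== SOURCE B (Python) =====
-- def parse_predicted_entities(entities_data):
--     """Categorize entity nodes into (user_attributes, object_attributes, policy_classes)."""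
--     nodes = entities_data.get("nodes", [])
--     user_attributes = [n.get("label", "") for n in nodes
--                        if n.get("label") and n.get("type", "") == "user_attributes"]
--     object_attributes = [n.get("label", "") for n in nodes
--                         if n.get("label") and n.get("type", "") == "object_attributes"]
--     policy_classes = [n.get("label", "") for n in nodes
--                      if n.get("label") and n.get("type", "") == "policy_classes"]
--     return user_attributes, object_attributes, policy_classes
-- ===== Notes on version B (the rewrite author's own statement) =====
-- stated objective: simpler
-- what changed: Replaces the single dispatch loop appending into three mutable lists with three independent filtered comprehensions over the nodes, one per entity type.
import Mathlib
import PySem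

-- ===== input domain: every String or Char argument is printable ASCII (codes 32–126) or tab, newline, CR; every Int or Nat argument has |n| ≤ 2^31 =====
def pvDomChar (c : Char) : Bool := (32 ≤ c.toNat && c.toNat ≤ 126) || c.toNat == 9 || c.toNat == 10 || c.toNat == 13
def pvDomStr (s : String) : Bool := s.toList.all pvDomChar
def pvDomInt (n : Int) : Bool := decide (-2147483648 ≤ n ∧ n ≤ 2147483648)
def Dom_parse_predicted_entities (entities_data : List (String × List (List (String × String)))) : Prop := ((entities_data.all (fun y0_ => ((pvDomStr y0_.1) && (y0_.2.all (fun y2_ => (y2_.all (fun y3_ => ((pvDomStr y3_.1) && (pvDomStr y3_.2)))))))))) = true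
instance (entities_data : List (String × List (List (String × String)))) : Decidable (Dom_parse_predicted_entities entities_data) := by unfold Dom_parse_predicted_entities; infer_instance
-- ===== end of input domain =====

-- B changes the decomposition: three independent filtered comprehensions instead of one dispatch loop (objective: simpler).

-- shared dict-lookup helper: node.get(k, d), first-match semantics
def pvGetD (n : List (String × String)) (k d : String) : String :=
  (PySem.Dict.mk n).getD k d

-- ===== PORT A =====
def parse_predicted_entities (entities_data : List (String × List (List (String × String)))) : List String × List String × List String :=
  let nodes := (PySem.Dict.mk entities_data).getD "nodes" []
  let acc := nodes.foldl (fun (acc : List String × List String × List String) node =>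
    let entity_type := pvGetD node "type" ""
    let entity_name := pvGetD node "label" ""
    if entity_name = "" then acc
    else if entity_type = "user_attributes" then (acc.1 ++ [entity_name], acc.2.1, acc.2.2)
    else if entity_type = "object_attributes" then (acc.1, acc.2.1 ++ [entity_name], acc.2.2)
    else if entity_type = "policy_classes" then (acc.1, acc.2.1, acc.2.2 ++ [entity_name])
    else acc) ([], [], [])
  acc

-- ===== PORT B =====
def pvPick (nodes : List (List (String × String))) (t : String) : List String :=
  (nodes.filter (fun n => pvGetD n "label" "" ≠ "" ∧ pvGetD n "type" "" = t)).map
    (fun n => pvGetD n "label" "")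

def parse_predicted_entities_alt (entities_data : List (String × List (List (String × String)))) : List String × List String × List String :=
  let nodes := (PySem.Dict.mk entities_data).getD "nodes" []
  (pvPick nodes "user_attributes", pvPick nodes "object_attributes", pvPick nodes "policy_classes")

-- ===== PRECONDITION & SPEC =====
def Spec_parse_predicted_entities (entities_data : List (String × List (List (String × String)))) (out : List String × List String × List String) : Prop := out = parse_predicted_entities_alt entities_data
instance (entities_data : List (String × List (List (String × String)))) (out : List String × List String × List String) : Decidable (Spec_parse_predicted_entities entities_data out) := by unfold Spec_parse_predicted_entities; infer_instance

-- ===== CLAIM (what is proved, stated in full; the proofs are below) =====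
def Claim_equal_parse_predicted_entities : Prop := ∀ (entities_data : List (String × List (List (String × String)))), Dom_parse_predicted_entities entities_data → Spec_parse_predicted_entities entities_data (parse_predicted_entities entities_data)

-- ===== LEMMAS AND PROOFS =====

-- loop invariant: A's fold starting from (ua, oa, pc) appends exactly B's three filtered lists
theorem pv_fold_eq (nodes : List (List (String × String))) (ua oa pc : List String) :
    nodes.foldl (fun (acc : List String × List String × List String) node =>
      let entity_type := pvGetD node "type" ""
      let entity_name := pvGetD node "label" ""
      if entity_name = "" then acc
      else if entity_type = "user_attributes" then (acc.1 ++ [entity_name], acc.2.1, acc.2.2)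
      else if entity_type = "object_attributes" then (acc.1, acc.2.1 ++ [entity_name], acc.2.2)
      else if entity_type = "policy_classes" then (acc.1, acc.2.1, acc.2.2 ++ [entity_name])
      else acc) (ua, oa, pc)
    = (ua ++ pvPick nodes "user_attributes",
       oa ++ pvPick nodes "object_attributes",
       pc ++ pvPick nodes "policy_classes") := by
  induction nodes generalizing ua oa pc with
  | nil => simp [pvPick]
  | cons n rest ih =>
    simp only [List.foldl_cons]
    by_cases hl : pvGetD n "label" "" = ""
    · simp [pvPick, hl, ih]
    · by_cases h1 : pvGetD n "type" "" = "user_attributes"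
      · simp [h1, ih, pvPick, hl]
      · by_cases h2 : pvGetD n "type" "" = "object_attributes"
        · simp [h2, ih, pvPick, hl]
        · by_cases h3 : pvGetD n "type" "" = "policy_classes"
          · simp [h3, ih, pvPick, hl]
          · simp [h1, h2, h3, ih, pvPick, hl]

-- ===== VERDICT (by name: the statement is the Claim_ definition above) =====
theorem parse_predicted_entities_spec : Claim_equal_parse_predicted_entities := by
  intro entities_data _
  unfold Spec_parse_predicted_entities parse_predicted_entities parse_predicted_entities_alt
  simp [pv_fold_eq]
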